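-- pv_equiv track=rewrite | github.com/Scalas/PS_LeetCode | solutions/sol_2373.py | largest_local
-- ===== SOURCE A (Python) =====
-- from typing import List
--
-- def largest_local(grid: List[List[int]]) -> List[List[int]]:
--     n = len(grid)
--     m = n - 2
--     res = [[0] * m for _ in range(m)]
--     for i in range(m):
--         for j in range(m):
--             r = 0
--             for x in range(3):
--                 for y in range(3):
--                     r = max(r, grid[i + x][j + y])
--             res[i][j] = r
--     return res
-- ===== SOURCE B (Python) =====
-- def largest_local(grid):
--     n = len(grid)
--     m = n - 2
--     # horizontal pass: max of each 1x3 strip in every row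
--     H = [[max(row[j], row[j + 1], row[j + 2]) for j in range(m)] for row in grid]
--     # vertical pass: max of each 3x1 strip of H, seeded with 0 as in the
--     # original's r = 0 accumulator
--     return [[max(0, H[i][j], H[i + 1][j], H[i + 2][j]) for j in range(m)]
--             for i in range(m)]
-- ===== Notes on version B (the rewrite author's own statement) =====
-- stated objective: faster
-- what changed: Replaces the 9-element scan per output cell by a separable two-pass max (horizontal 1x3 maxima, then vertical 3x1 maxima seeded with 0 like A's r=0 accumulator), so each cell costs 2+3 comparisons instead of 9.
import Mathlib
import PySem

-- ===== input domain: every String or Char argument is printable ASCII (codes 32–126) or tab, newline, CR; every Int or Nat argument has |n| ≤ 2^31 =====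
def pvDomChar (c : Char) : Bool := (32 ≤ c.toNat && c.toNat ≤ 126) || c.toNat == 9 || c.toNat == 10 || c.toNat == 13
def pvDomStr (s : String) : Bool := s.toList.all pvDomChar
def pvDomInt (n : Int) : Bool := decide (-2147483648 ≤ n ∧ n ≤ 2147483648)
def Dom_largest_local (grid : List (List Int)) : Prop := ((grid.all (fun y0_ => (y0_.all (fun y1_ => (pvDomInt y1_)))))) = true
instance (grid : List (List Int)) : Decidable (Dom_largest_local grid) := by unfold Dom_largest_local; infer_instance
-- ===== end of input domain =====

-- B replaces the per-cell 3x3 scan by a separable two-pass max (horizontal then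
-- vertical, the vertical fold seeded with 0 exactly as A's r = 0 accumulator is):
-- fewer comparisons per output cell. Return values only (neither mutates).

-- ===== PORT A =====
-- literal port of A: nested loops over range(m), r = 0 accumulator maximised
-- over the 3x3 window; grid[i+x][j+y] is ported with pyGetD (in range on Pre_).
def largest_local (grid : List (List Int)) : List (List Int) :=
  let n : Int := grid.length
  let m : Int := n - 2
  (PySem.List.pyRange 0 m 1).map (fun i =>
    (PySem.List.pyRange 0 m 1).map (fun j =>
      (PySem.List.pyRange 0 3 1).foldl (fun r x =>
        (PySem.List.pyRange 0 3 1).foldl (fun r y =>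
          max r (PySem.List.pyGetD (PySem.List.pyGetD grid (i + x) []) (j + y) 0)) r) 0))

-- ===== PORT B =====
-- literal port of Source B: horizontal pass H, then vertical pass with the 0 seed.
-- Python's max(a, b, c) is the left fold max (max a b) c.
def largest_local_alt (grid : List (List Int)) : List (List Int) :=
  let n : Int := grid.length
  let m : Int := n - 2
  let H : List (List Int) := grid.map (fun row =>
    (PySem.List.pyRange 0 m 1).map (fun j =>
      max (max (PySem.List.pyGetD row j 0) (PySem.List.pyGetD row (j + 1) 0))
        (PySem.List.pyGetD row (j + 2) 0)))
  (PySem.List.pyRange 0 m 1).map (fun i =>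
    (PySem.List.pyRange 0 m 1).map (fun j =>
      max (max (max 0 (PySem.List.pyGetD (PySem.List.pyGetD H i []) j 0))
            (PySem.List.pyGetD (PySem.List.pyGetD H (i + 1) []) j 0))
        (PySem.List.pyGetD (PySem.List.pyGetD H (i + 2) []) j 0)))

-- ===== PRECONDITION & SPEC =====
-- Pre_ excludes exactly the grids on which the Python A raises IndexError:
-- with n = len(grid) ≥ 3 A reads grid[a][b] for all a < n, b < n, so every
-- row must have length ≥ n (for n ≤ 2 no cell is read and A returns []).
def Pre_largest_local (grid : List (List Int)) : Prop :=
  (grid.length : Int) - 2 ≤ 0 ∨ ∀ row ∈ grid, grid.length ≤ row.length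
instance (grid : List (List Int)) : Decidable (Pre_largest_local grid) := by
  unfold Pre_largest_local; infer_instance
def pvWitness_largest_local : List (List Int) := [[9, 9, 8], [1, 1, 1], [2, 3, 4]]
def Spec_largest_local (grid : List (List Int)) (out : List (List Int)) : Prop := out = largest_local_alt grid
instance (grid : List (List Int)) (out : List (List Int)) : Decidable (Spec_largest_local grid out) := by unfold Spec_largest_local; infer_instance

-- ===== CLAIM (what is proved, stated in full; the proofs are below) =====
def Claim_equal_largest_local : Prop := ∀ (grid : List (List Int)), Dom_largest_local grid → Pre_largest_local grid → Spec_largest_local grid (largest_local grid)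

-- ===== LEMMAS AND PROOFS =====

-- the 3x3 accumulator of A written out as an explicit max chain
theorem pv_foldA (g : Int → Int → Int) (i j : Int) :
    ((PySem.List.pyRange 0 3 1).foldl (fun r x =>
        (PySem.List.pyRange 0 3 1).foldl (fun r y =>
          max r (g (i + x) (j + y))) r) 0)
    = max (max (max (max (max (max (max (max (max 0
        (g i j)) (g i (j+1))) (g i (j+2)))
        (g (i+1) j)) (g (i+1) (j+1))) (g (i+1) (j+2)))
        (g (i+2) j)) (g (i+2) (j+1))) (g (i+2) (j+2)) := by
  have h3 : PySem.List.pyRange 0 3 1 = [0, 1, 2] := by decide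
  simp [h3, List.foldl]

-- regrouping a left-nested 9-term max chain into the 3+3+3 shape of B
theorem pv_max_regroup (a b c d e f g h i : Int) :
    max (max (max (max (max (max (max (max (max 0 a) b) c) d) e) f) g) h) i
    = max (max (max 0 (max (max a b) c)) (max (max d e) f)) (max (max g h) i) := by
  simp [max_assoc]

-- the two ports agree on every cell
theorem pv_cell_eq (grid : List (List Int)) (i j : Int)
    (hi0 : 0 ≤ i) (hi : i < (grid.length : Int) - 2)
    (hj0 : 0 ≤ j) (hj : j < (grid.length : Int) - 2) :
    ((PySem.List.pyRange 0 3 1).foldl (fun r x =>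
        (PySem.List.pyRange 0 3 1).foldl (fun r y =>
          max r (PySem.List.pyGetD (PySem.List.pyGetD grid (i + x) []) (j + y) 0)) r) 0)
    = max (max (max 0 (PySem.List.pyGetD (PySem.List.pyGetD (grid.map (fun row =>
          (PySem.List.pyRange 0 ((grid.length : Int) - 2) 1).map (fun j =>
            max (max (PySem.List.pyGetD row j 0) (PySem.List.pyGetD row (j + 1) 0))
              (PySem.List.pyGetD row (j + 2) 0)))) i []) j 0))
            (PySem.List.pyGetD (PySem.List.pyGetD (grid.map (fun row =>
          (PySem.List.pyRange 0 ((grid.length : Int) - 2) 1).map (fun j =>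
            max (max (PySem.List.pyGetD row j 0) (PySem.List.pyGetD row (j + 1) 0))
              (PySem.List.pyGetD row (j + 2) 0)))) (i + 1) []) j 0))
        (PySem.List.pyGetD (PySem.List.pyGetD (grid.map (fun row =>
          (PySem.List.pyRange 0 ((grid.length : Int) - 2) 1).map (fun j =>
            max (max (PySem.List.pyGetD row j 0) (PySem.List.pyGetD row (j + 1) 0))
              (PySem.List.pyGetD row (j + 2) 0)))) (i + 2) []) j 0) := by
  have hH : ∀ a : Int, 0 ≤ a → a < (grid.length : Int) →
      PySem.List.pyGetD (PySem.List.pyGetD (grid.map (fun row =>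
          (PySem.List.pyRange 0 ((grid.length : Int) - 2) 1).map (fun j =>
            max (max (PySem.List.pyGetD row j 0) (PySem.List.pyGetD row (j + 1) 0))
              (PySem.List.pyGetD row (j + 2) 0)))) a []) j 0
      = max (max (PySem.List.pyGetD (PySem.List.pyGetD grid a []) j 0)
          (PySem.List.pyGetD (PySem.List.pyGetD grid a []) (j + 1) 0))
          (PySem.List.pyGetD (PySem.List.pyGetD grid a []) (j + 2) 0) := by
    intro a ha0 ha
    have hlen : a.toNat < grid.length := by omega
    have h1 : PySem.List.pyGetD grid a [] = grid[a.toNat] :=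
      PySem.List.pyGetD_eq_getElem grid [] ha0 ha
    have h2 : PySem.List.pyGetD (grid.map (fun row =>
          (PySem.List.pyRange 0 ((grid.length : Int) - 2) 1).map (fun j =>
            max (max (PySem.List.pyGetD row j 0) (PySem.List.pyGetD row (j + 1) 0))
              (PySem.List.pyGetD row (j + 2) 0)))) a []
        = (PySem.List.pyRange 0 ((grid.length : Int) - 2) 1).map (fun j =>
            max (max (PySem.List.pyGetD grid[a.toNat] j 0)
              (PySem.List.pyGetD grid[a.toNat] (j + 1) 0))
              (PySem.List.pyGetD grid[a.toNat] (j + 2) 0)) := by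
      rw [PySem.List.pyGetD_eq_getElem _ [] ha0 (by simpa using ha)]
      simp
    rw [h2, PySem.List.pyGetD_map_pyRange_of_nonneg _ _ _ _ hj0 hj, h1]
  rw [pv_foldA (fun a b => PySem.List.pyGetD (PySem.List.pyGetD grid a []) b 0) i j,
    hH i hi0 (by omega), hH (i + 1) (by omega) (by omega), hH (i + 2) (by omega) (by omega)]
  exact pv_max_regroup _ _ _ _ _ _ _ _ _

-- ===== VERDICT (by name: the statement is the Claim_ definition above) =====
theorem largest_local_spec : Claim_equal_largest_local := by
  intro grid _ _
  unfold Spec_largest_local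
  simp only [largest_local, largest_local_alt]
  apply List.map_congr_left
  intro i hi
  apply List.map_congr_left
  intro j hj
  rw [PySem.List.mem_pyRange_one] at hi hj
  exact pv_cell_eq grid i j hi.1 hi.2 hj.1 hj.2
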